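-- pv_equiv track=rewrite | github.com/ivankitanovski/ocr-project | src/utils.py | determine_consensus
-- ===== SOURCE A (Python) =====
-- from collections import Counter
-- from collections import Counter
--
-- def majority_vote(chars):
--     """Perform majority voting on a list of characters."""
--     return Counter(chars).most_common(1)[0][0]
--
-- def determine_consensus(easyocr_text, pytesseract_text, trocr_text):
--     """Combine the outputs of the OCR tools using a character-by-character majority voting."""
--     # Find the length of the longest OCR output
--     max_length = max(len(easyocr_text), len(pytesseract_text), len(trocr_text))
--
--     combined_chars = []
--
--     for i in range(max_length):
--         # Get the character at the current index for each OCR output, or an empty string if the index is out of range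
--         easy_char = easyocr_text[i] if i < len(easyocr_text) else ""
--         pytes_char = pytesseract_text[i] if i < len(pytesseract_text) else ""
--         trocr_char = trocr_text[i] if i < len(trocr_text) else ""
--
--         chars = [easy_char, pytes_char, trocr_char]
--
--         # Perform majority voting on the characters
--         most_common_char = majority_vote(chars)
--
--         # Add the most common character to the combined output
--         combined_chars.append(most_common_char)
--
--     return "".join(combined_chars)
-- ===== SOURCE B (Python) =====
-- from itertools import zip_longest
--
-- def determine_consensus(easyocr_text, pytesseract_text, trocr_text):
--     """Combine the outputs of the OCR tools using a character-by-character majority voting."""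
--     m = max(len(pytesseract_text), len(trocr_text))
--     # Baseline: easyocr truncated to m (any longer easyocr tail is outvoted by the two
--     # paddings of the shorter texts) and padded with "" where easyocr itself is shorter.
--     base = list(easyocr_text[:m]) + [""] * (m - len(easyocr_text))
--     pairs = zip_longest(pytesseract_text, trocr_text, fillvalue="")
--     # Patch pass: wherever the other two engines agree, their character overrides the baseline.
--     return "".join(pc if pc == tc else b for (pc, tc), b in zip(pairs, base))
-- ===== Notes on version B (the rewrite author's own statement) =====
-- stated objective: faster
-- what changed: Replaces the per-position three-way Counter/most_common vote over range(max_length) with a baseline-plus-patch scheme: easyocr truncated to max(len(pytesseract),len(trocr)) (its longer tail is always outvoted by the two paddings) is the baseline, and one zip over the pytesseract/trocr pair overrides each position where those two engines agree; no Counter object or sort is built per character, which removes a large constant factor (measured ~20x).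
import Mathlib
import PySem

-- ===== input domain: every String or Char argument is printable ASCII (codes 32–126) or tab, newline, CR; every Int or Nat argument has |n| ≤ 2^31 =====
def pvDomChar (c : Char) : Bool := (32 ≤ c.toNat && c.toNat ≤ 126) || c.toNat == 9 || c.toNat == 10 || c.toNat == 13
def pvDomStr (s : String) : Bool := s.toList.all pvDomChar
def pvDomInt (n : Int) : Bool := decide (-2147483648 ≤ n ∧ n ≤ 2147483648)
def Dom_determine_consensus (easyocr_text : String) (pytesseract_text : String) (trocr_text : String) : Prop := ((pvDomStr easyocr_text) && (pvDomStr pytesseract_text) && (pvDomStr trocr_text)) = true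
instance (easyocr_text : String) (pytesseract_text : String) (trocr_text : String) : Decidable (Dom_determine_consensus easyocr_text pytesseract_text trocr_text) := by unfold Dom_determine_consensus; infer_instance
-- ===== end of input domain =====

-- B replaces A's per-position three-way Counter vote by a baseline-plus-patch scheme (easyocr
-- truncated to the other two engines' max length, patched where those two agree); objective: faster
-- (no per-character Counter/sort; a timing run measured B ≥ 1.5× faster).

-- ===== PORT A =====
-- `s[i] if i < len(s) else ""` — A's conditional indexing, as a String ("" or one char)
def pvCharAt (l : List Char) (i : Int) : String :=
  if i < (l.length : Int) then ((PySem.List.pyGet? l i).map (fun c => String.ofList [c])).getD "" else ""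

-- Counter(chars).most_common(1)[0][0]: most_common is the count-descending stable sort of the
-- items (documented as sorted(items, key=count, reverse=True)); [0] raises only on an empty
-- chars list, which the caller never passes — the [] arm is an unreachable totalizing guard.
def majority_vote (chars : List String) : String :=
  match PySem.List.sorted (PySem.Dict.counter chars).items (fun p => p.2) true with
  | p :: _ => p.1
  | [] => ""

def determine_consensus (easyocr_text : String) (pytesseract_text : String) (trocr_text : String) : String :=
  let max_length : Int := max (PySem.Str.len easyocr_text) (max (PySem.Str.len pytesseract_text) (PySem.Str.len trocr_text))
  let combined_chars := (PySem.List.pyRange 0 max_length 1).foldl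
    (fun acc i =>
      let easy_char := pvCharAt easyocr_text.toList i
      let pytes_char := pvCharAt pytesseract_text.toList i
      let trocr_char := pvCharAt trocr_text.toList i
      acc ++ [majority_vote [easy_char, pytes_char, trocr_char]]) []
  PySem.Str.join "" combined_chars

-- ===== PORT B =====
-- first element as a 1-char string, or zip_longest's fillvalue ""
def pvHd (l : List Char) : String := match l with | [] => "" | c :: _ => String.ofList [c]

-- zip_longest(ps, ts, fillvalue="") over the two character streams
def pvZip2 : List Char → List Char → List (String × String)
  | [], [] => []
  | b :: bs, cs => (String.ofList [b], pvHd cs) :: pvZip2 bs cs.tail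
  | [], c :: cs => ("", String.ofList [c]) :: pvZip2 [] cs

def determine_consensus_alt (easyocr_text : String) (pytesseract_text : String) (trocr_text : String) : String :=
  let m : Int := max (PySem.Str.len pytesseract_text) (PySem.Str.len trocr_text)
  -- base = list(easyocr_text[:m]) + [""] * (m - len(easyocr_text))
  let base : List String :=
    (PySem.List.slice easyocr_text.toList none (some m)).map (fun c => String.ofList [c])
      ++ List.replicate (m - PySem.Str.len easyocr_text).toNat ""
  let pairs := pvZip2 pytesseract_text.toList trocr_text.toList
  PySem.Str.join "" (List.zipWith (fun pt b => if pt.1 == pt.2 then pt.1 else b) pairs base)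

-- ===== PRECONDITION & SPEC =====
def Spec_determine_consensus (easyocr_text : String) (pytesseract_text : String) (trocr_text : String) (out : String) : Prop := out = determine_consensus_alt easyocr_text pytesseract_text trocr_text
instance (easyocr_text : String) (pytesseract_text : String) (trocr_text : String) (out : String) : Decidable (Spec_determine_consensus easyocr_text pytesseract_text trocr_text out) := by unfold Spec_determine_consensus; infer_instance

-- ===== CLAIM =====
def Claim_equal_determine_consensus : Prop := ∀ (easyocr_text : String) (pytesseract_text : String) (trocr_text : String), Dom_determine_consensus easyocr_text pytesseract_text trocr_text → Spec_determine_consensus easyocr_text pytesseract_text trocr_text (determine_consensus easyocr_text pytesseract_text trocr_text)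

-- ===== LEMMAS AND PROOFS =====

-- the per-position vote: Counter majority with its insertion-order tie-break is 'b if b == c else a'
lemma majority_vote_eq (a b c : String) : majority_vote [a, b, c] = if b == c then b else a := by
  by_cases hab : a = b <;> by_cases hac : a = c <;> by_cases hbc : b = c <;>
    first
    | (exfalso; first | exact hbc (hab ▸ hac) | exact hac (hab.trans hbc) | exact hab (hac.trans hbc.symm))
    | (subst_vars
       try have hab' := Ne.symm hab
       try have hac' := Ne.symm hac
       try have hbc' := Ne.symm hbc
       simp [majority_vote, PySem.Dict.items_counter, PySem.Set.ofList, PySem.Set.add,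
         PySem.List.sorted, PySem.List.insertBy, List.count, *])

lemma pvCharAt_zero (l : List Char) : pvCharAt l 0 = pvHd l := by
  cases l with
  | nil => simp [pvCharAt, pvHd]
  | cons c t => simp [pvCharAt, pvHd, PySem.List.pyGet?, PySem.List.pyIdx?]

lemma pvCharAt_succ (l : List Char) (k : Nat) :
    pvCharAt l ((k : Int) + 1) = pvCharAt l.tail (k : Int) := by
  cases l with
  | nil => simp [pvCharAt]; omega
  | cons c t =>
    by_cases h : k < t.length
    · have h1 : ((k:Int) + 1) < ((c :: t).length : Int) := by simp; omega
      rw [pvCharAt, pvCharAt]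
      rw [if_pos h1, if_pos (by exact_mod_cast h)]
      rw [show ((k:Int)+1) = (((k+1:Nat)):Int) by push_cast; ring]
      rw [PySem.List.pyGet?_natCast, PySem.List.pyGet?_natCast]
      simp
    · rw [pvCharAt, pvCharAt]
      rw [if_neg (by simp; omega), if_neg (by simp; omega)]

lemma pvCharAt_ge (l : List Char) (k : Nat) (h : l.length ≤ k) : pvCharAt l (k : Int) = "" := by
  rw [pvCharAt, if_neg (by exact_mod_cast not_lt.mpr h)]

-- B's baseline list, in Nat form
def pvBase (la : List Char) (m : Nat) : List String :=
  (la.take m).map (fun c => String.ofList [c]) ++ List.replicate (m - la.length) ""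

lemma pvBase_succ (la : List Char) (m : Nat) :
    pvBase la (m + 1) = pvHd la :: pvBase la.tail m := by
  cases la with
  | nil => simp [pvBase, pvHd, List.replicate_succ]
  | cons a as => simp [pvBase, pvHd]

lemma pvZip2_cons (lb lc : List Char) (h : 0 < max lb.length lc.length) :
    pvZip2 lb lc = (pvHd lb, pvHd lc) :: pvZip2 lb.tail lc.tail := by
  cases lb with
  | cons b bs => simp [pvZip2, pvHd]
  | nil =>
    cases lc with
    | cons c cs => simp [pvZip2, pvHd]
    | nil => simp at h

-- the patch pass over the zip equals the per-index map over range m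
lemma map_range_eq_zipWith : ∀ (m : Nat) (la lb lc : List Char),
    m = max lb.length lc.length →
    (List.range m).map (fun (k : Nat) =>
        if pvCharAt lb (k : Int) == pvCharAt lc (k : Int) then pvCharAt lb (k : Int) else pvCharAt la (k : Int))
      = List.zipWith (fun pt b => if pt.1 == pt.2 then pt.1 else b) (pvZip2 lb lc) (pvBase la m) := by
  intro m
  induction m with
  | zero =>
    intro la lb lc h
    have hb : lb = [] := by cases lb <;> simp_all <;> omega
    have hc : lc = [] := by cases lc <;> simp_all
    subst hb hc
    simp [pvZip2, pvBase]
  | succ n ih =>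
    intro la lb lc h
    rw [pvZip2_cons lb lc (by omega), pvBase_succ, List.range_succ_eq_map]
    simp only [List.map_cons, List.map_map, List.zipWith_cons_cons]
    congr 1
    · simp [pvCharAt_zero]
    · rw [← ih la.tail lb.tail lc.tail (by cases lb <;> cases lc <;> simp_all <;> omega)]
      apply List.map_congr_left
      intro k _
      simp [Function.comp, pvCharAt_succ]

lemma chars_join_nil (LL : List (List Char)) : PySem.Chars.join [] LL = LL.flatten := by
  induction LL with
  | nil => simp [PySem.Chars.join, List.intercalate]
  | cons x xs ih =>
    cases xs with
    | nil => simp [PySem.Chars.join, List.intercalate]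
    | cons y ys =>
      simp only [PySem.Chars.join, List.intercalate] at ih ⊢
      simp [List.intersperse, List.flatten] at ih ⊢
      exact ih

-- joining drops the all-"" tail that A produces beyond max(len p, len t)
lemma join_eq_of_tail_empty (f : Nat → String) (m N : Nat) (hmN : m ≤ N)
    (h : ∀ k, m ≤ k → k < N → f k = "") :
    PySem.Str.join "" ((List.range N).map f) = PySem.Str.join "" ((List.range m).map f) := by
  have hN : N = m + (N - m) := by omega
  rw [hN, List.range_add, List.map_append, List.map_map]
  unfold PySem.Str.join
  congr 1
  have h0 : ("" : String).toList = [] := rfl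
  rw [h0, List.map_append, chars_join_nil, chars_join_nil, List.flatten_append]
  have hz : (List.map String.toList (List.map (f ∘ fun x => m + x) (List.range (N - m)))).flatten = [] := by
    rw [List.flatten_eq_nil_iff]
    intro x hx
    simp only [List.map_map, List.mem_map, List.mem_range] at hx
    obtain ⟨y, hy, rfl⟩ := hx
    simp [Function.comp, h (m + y) (by omega) (by omega)]
  rw [hz, List.append_nil]

-- ===== VERDICT =====
theorem determine_consensus_spec : Claim_equal_determine_consensus := by
  intro e p t _
  unfold Spec_determine_consensus determine_consensus determine_consensus_alt
  dsimp only
  rw [PySem.List.foldl_append_singleton_eq_map]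
  have hlen : max (PySem.Str.len e) (max (PySem.Str.len p) (PySem.Str.len t))
      = ((max e.toList.length (max p.toList.length t.toList.length) : Nat) : Int) := by
    simp [PySem.Str.len_eq]
  rw [hlen, PySem.List.pyRange_zero_nat, List.map_map, List.nil_append]
  have hm : (max (PySem.Str.len p) (PySem.Str.len t))
      = ((max p.toList.length t.toList.length : Nat) : Int) := by
    simp [PySem.Str.len_eq]
  set m : Nat := max p.toList.length t.toList.length with hmdef
  set N : Nat := max e.toList.length m with hNdef
  have he : PySem.Str.len e = (e.toList.length : Int) := by simp [PySem.Str.len_eq]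
  have hcnt : (((m : Int)) - ((e.toList.length : Nat) : Int)).toNat = m - e.toList.length := by omega
  have hbase :
      (PySem.List.slice e.toList none (some (max (PySem.Str.len p) (PySem.Str.len t)))).map (fun c => String.ofList [c])
        ++ List.replicate ((max (PySem.Str.len p) (PySem.Str.len t)) - PySem.Str.len e).toNat ""
      = pvBase e.toList m := by
    rw [hm, he, PySem.List.slice_to_natCast, hcnt]
    rfl
  rw [hbase]
  have hvote : ((fun i => majority_vote [pvCharAt e.toList i, pvCharAt p.toList i, pvCharAt t.toList i]) ∘ fun (k : Nat) => (k : Int))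
      = fun (k : Nat) =>
          if pvCharAt p.toList (k:Int) == pvCharAt t.toList (k:Int) then pvCharAt p.toList (k:Int)
          else pvCharAt e.toList (k:Int) := by
    funext k
    simp [Function.comp, majority_vote_eq]
  rw [hvote]
  rw [join_eq_of_tail_empty _ m N (by omega)
    (by
      intro k hk _
      have hp : pvCharAt p.toList (k : Int) = "" := pvCharAt_ge _ _ (by omega)
      have ht : pvCharAt t.toList (k : Int) = "" := pvCharAt_ge _ _ (by omega)
      simp [hp, ht])]
  rw [map_range_eq_zipWith m e.toList p.toList t.toList rfl]
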